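-- pv_equiv track=rewrite | github.com/siebeniris/vec2text_exp | language_confusion/preprocessing_for_regression.py | get_lang2lang_script_dict
-- ===== SOURCE A (Python) =====
-- from itertools import product
--
-- def get_lang2lang_script_dict(eval_langs_list):
--     """
--     get lang2lang script dict from pairs of languages.
--     For example, arb_Arab and urd_Arab has the same script, then it outputs 1.
--     """
--     lang2lang_script = dict()
--     for lang1, lang2 in product(eval_langs_list, repeat=2):
--         lang1_script = lang1.split("_")[1]
--         lang2_script = lang2.split("_")[1]
--         if lang1_script == lang2_script:
--             if lang1 not in lang2lang_script:
--                 lang2lang_script[lang1] = dict()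
--             lang2lang_script[lang1][lang2] = 1
--         else:
--             if lang1 not in lang2lang_script:
--                 lang2lang_script[lang1] = dict()
--             lang2lang_script[lang1][lang2] = 0
--     return lang2lang_script
-- ===== SOURCE B (Python) =====
-- def get_lang2lang_script_dict(eval_langs_list):
--     """
--     get lang2lang script dict from pairs of languages.
--     For example, arb_Arab and urd_Arab has the same script, then it outputs 1.
--     """
--     # group languages by script
--     script2langs = {}
--     for lang in eval_langs_list:
--         script2langs.setdefault(lang.split("_")[1], []).append(lang)
--     # start from an all-zero matrix ...
--     result = {l1: {l2: 0 for l2 in eval_langs_list} for l1 in eval_langs_list}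
--     # ... and set the pairs inside each script group to 1
--     for langs in script2langs.values():
--         for a in langs:
--             for b in langs:
--                 result[a][b] = 1
--     return result
-- ===== Notes on version B (the rewrite author's own statement) =====
-- stated objective: alternative
-- what changed: Instead of scanning all n^2 ordered pairs and branching on a script comparison for each, B groups the languages by script once, initialises the whole matrix to 0 with a dict comprehension, and then sets only the within-group pairs to 1.
import Mathlib
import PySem

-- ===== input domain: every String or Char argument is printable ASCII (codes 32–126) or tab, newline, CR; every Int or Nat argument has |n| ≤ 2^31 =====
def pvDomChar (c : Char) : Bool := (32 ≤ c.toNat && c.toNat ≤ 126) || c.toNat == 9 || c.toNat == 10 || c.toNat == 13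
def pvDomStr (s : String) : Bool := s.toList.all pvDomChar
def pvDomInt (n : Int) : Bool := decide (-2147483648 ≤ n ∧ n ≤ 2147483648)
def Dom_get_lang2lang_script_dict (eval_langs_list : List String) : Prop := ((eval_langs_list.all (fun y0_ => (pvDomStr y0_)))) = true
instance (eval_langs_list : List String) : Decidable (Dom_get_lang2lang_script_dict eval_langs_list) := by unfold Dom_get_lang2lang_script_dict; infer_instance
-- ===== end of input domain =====

-- B groups the languages by script, builds an all-zero matrix with a comprehension, and sets
-- only the within-group pairs to 1, instead of A's same/different branch on every ordered pair.

-- shared helper: total form of Python's  lang.split("_")[1]  (exact under Pre_, where the index is in range)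
def pvScript (l : String) : String := (PySem.List.pyGet? ((PySem.Str.split? l "_").getD []) 1).getD ""

-- ===== PORT A =====
def get_lang2lang_script_dict (eval_langs_list : List String) : List (String × List (String × Int)) :=
  let d :=
    eval_langs_list.foldl (fun d lang1 =>
      eval_langs_list.foldl (fun d lang2 =>
        let lang1_script := pvScript lang1
        let lang2_script := pvScript lang2
        if lang1_script == lang2_script then
          let d := if d.contains lang1 then d else d.insert lang1 PySem.Dict.empty
          d.insert lang1 ((d.getD lang1 PySem.Dict.empty).insert lang2 (1 : Int))
        else
          let d := if d.contains lang1 then d else d.insert lang1 PySem.Dict.empty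
          d.insert lang1 ((d.getD lang1 PySem.Dict.empty).insert lang2 (0 : Int))) d)
      (PySem.Dict.empty : PySem.Dict String (PySem.Dict String Int))
  d.items.map (fun p => (p.1, p.2.items))

-- ===== PORT B =====
def get_lang2lang_script_dict_alt (eval_langs_list : List String) : List (String × List (String × Int)) :=
  -- script2langs: setdefault(script, []).append(lang)  ≡  modify script [] (· ++ [lang])
  let script2langs :=
    eval_langs_list.foldl (fun g lang => g.modify (pvScript lang) [] (fun ls => ls ++ [lang]))
      (PySem.Dict.empty : PySem.Dict String (List String))
  -- result = {l1: {l2: 0 for l2 in eval_langs_list} for l1 in eval_langs_list}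
  let result :=
    eval_langs_list.foldl (fun d l1 =>
        d.insert l1 (eval_langs_list.foldl (fun m l2 => m.insert l2 (0 : Int)) PySem.Dict.empty))
      (PySem.Dict.empty : PySem.Dict String (PySem.Dict String Int))
  -- for langs in script2langs.values(): for a in langs: for b in langs: result[a][b] = 1
  let result :=
    script2langs.values.foldl (fun d langs =>
      langs.foldl (fun d a =>
        langs.foldl (fun d b => d.insert a ((d.getD a PySem.Dict.empty).insert b (1 : Int))) d) d)
      result
  result.items.map (fun p => (p.1, p.2.items))

-- ===== PRECONDITION & SPEC =====
-- Pre_: every language splits on "_" into at least two pieces; otherwise Python's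
-- lang.split("_")[1] raises IndexError (in A and in B alike).
def Pre_get_lang2lang_script_dict (eval_langs_list : List String) : Prop :=
  ∀ l ∈ eval_langs_list, 2 ≤ ((PySem.Str.split? l "_").getD []).length
instance (eval_langs_list : List String) : Decidable (Pre_get_lang2lang_script_dict eval_langs_list) := by
  unfold Pre_get_lang2lang_script_dict; infer_instance

def pvWitness_get_lang2lang_script_dict : List String := ["arb_Arab", "urd_Arab", "eng_Latn"]

def Spec_get_lang2lang_script_dict (eval_langs_list : List String) (out : List (String × List (String × Int))) : Prop := out = get_lang2lang_script_dict_alt eval_langs_list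
instance (eval_langs_list : List String) (out : List (String × List (String × Int))) : Decidable (Spec_get_lang2lang_script_dict eval_langs_list out) := by unfold Spec_get_lang2lang_script_dict; infer_instance

-- ===== CLAIM (what is proved, stated in full; the proofs are below) =====
def Claim_equal_get_lang2lang_script_dict : Prop := ∀ (eval_langs_list : List String), Dom_get_lang2lang_script_dict eval_langs_list → Pre_get_lang2lang_script_dict eval_langs_list → Spec_get_lang2lang_script_dict eval_langs_list (get_lang2lang_script_dict eval_langs_list)

-- ===== LEMMAS AND PROOFS =====

-- the 0/1 entry for a pair of languages
def pvBit (l1 l2 : String) : Int := if pvScript l1 == pvScript l2 then 1 else 0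

-- the common normal form both ports are proved equal to
def pvF (xs : List String) : List (String × List (String × Int)) :=
  (PySem.List.dedup xs).map (fun l1 => (l1, (PySem.List.dedup xs).map (fun l2 => (l2, pvBit l1 l2))))


-- proof-side abbreviations for A's normalized loop bodies
def pvRowStep (l1 : String) (r : PySem.Dict String Int) (l2 : String) : PySem.Dict String Int :=
  r.insert l2 (pvBit l1 l2)

def pvStep (l1 : String) (d : PySem.Dict String (PySem.Dict String Int)) (l2 : String) :
    PySem.Dict String (PySem.Dict String Int) :=
  d.insert l1 ((d.getD l1 PySem.Dict.empty).insert l2 (pvBit l1 l2))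

-- A's loop body with the membership check and the two identical-shaped branches collapses to one insert
lemma pvStepA_norm (d : PySem.Dict String (PySem.Dict String Int)) (l1 l2 : String) :
    (if pvScript l1 == pvScript l2 then
        let d' := if d.contains l1 then d else d.insert l1 PySem.Dict.empty
        d'.insert l1 ((d'.getD l1 PySem.Dict.empty).insert l2 (1 : Int))
      else
        let d' := if d.contains l1 then d else d.insert l1 PySem.Dict.empty
        d'.insert l1 ((d'.getD l1 PySem.Dict.empty).insert l2 (0 : Int)))
    = pvStep l1 d l2 := by
  unfold pvStep pvBit
  by_cases hc : d.contains l1 = true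
  · cases hb : pvScript l1 == pvScript l2 <;> simp [hc]
  · have hc' := eq_false_of_ne_true hc
    cases hb : pvScript l1 == pvScript l2 <;>
      simp [hc', PySem.Dict.insert_insert_self, PySem.Dict.getD_insert_self,
        PySem.Dict.getD_of_not_contains d PySem.Dict.empty hc']

-- hoist the repeated 'd[l1] = ...' of A's inner loop into a single outer insert
lemma pvInnerA (l1 : String) : ∀ (t : List String) (y : String) (d : PySem.Dict String (PySem.Dict String Int)),
    (y :: t).foldl (pvStep l1) d
      = d.insert l1 ((y :: t).foldl (pvRowStep l1) (d.getD l1 PySem.Dict.empty)) := by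
  intro t
  induction t with
  | nil => intro y d; simp [pvStep, pvRowStep]
  | cons z t' ih =>
    intro y d
    have h1 : (y :: z :: t').foldl (pvStep l1) d = (z :: t').foldl (pvStep l1) (pvStep l1 d y) := rfl
    rw [h1, ih z]
    simp [pvStep, pvRowStep, PySem.Dict.getD_insert_self, PySem.Dict.insert_insert_self]

-- a fold of inserts with values given by a fixed function: every present key holds its function value
lemma pvRowProp {ν : Type} (f : String → ν) (dflt : ν) : ∀ (ys : List String) (r : PySem.Dict String ν),
    (∀ k, k ∈ r.keys → r.getD k dflt = f k) →
    ∀ k, k ∈ (ys.foldl (fun r k' => r.insert k' (f k')) r).keys →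
      (ys.foldl (fun r k' => r.insert k' (f k')) r).getD k dflt = f k := by
  intro ys
  induction ys with
  | nil => intro r h k hk; exact h k hk
  | cons y t ih =>
    intro r h k hk
    simp only [List.foldl_cons] at hk ⊢
    refine ih (r.insert y (f y)) ?_ k hk
    intro k' hk'
    by_cases hky : k' = y
    · subst hky; rw [PySem.Dict.getD_insert_self]
    · rw [PySem.Dict.getD_insert_of_ne _ _ _ hky]
      exact h k' (((PySem.Dict.mem_keys_insert _ _ _ _).mp hk').resolve_left hky)

-- inserting a key's exact current value leaves the dict unchanged
lemma pvInsertSame {ν : Type} (r : PySem.Dict String ν) (k : String) (v : ν)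
    (hnd : r.keys.Nodup) (h : r.get? k = some v) : r.insert k v = r := by
  apply PySem.Dict.ext
  have hc : r.contains k = true := by rw [PySem.Dict.contains_eq_isSome_get?, h]; rfl
  rw [PySem.Dict.items_insert_of_contains _ _ hc]
  conv_rhs => rw [← List.map_id r.items]
  refine List.map_congr_left (fun p hp => ?_)
  by_cases hpk : (p.1 == k) = true
  · have hpk' : p.1 = k := by simpa using hpk
    have h2 := PySem.Dict.get?_of_mem_items (d := r) (k := p.1) (v := p.2) (by simpa using hp) hnd
    rw [hpk', h] at h2
    have hv : v = p.2 := Option.some.inj h2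
    simp only [hpk, if_true, id]
    rw [hv, ← hpk']
  · simp [hpk]

-- re-running an insert fold whose values the dict already holds is a no-op
lemma pvFoldlInsertFixed {ν : Type} (f : String → ν) : ∀ (ys : List String) (r : PySem.Dict String ν),
    r.keys.Nodup → (∀ k ∈ ys, r.get? k = some (f k)) →
    ys.foldl (fun r k => r.insert k (f k)) r = r := by
  intro ys
  induction ys with
  | nil => intro r _ _; rfl
  | cons y t ih =>
    intro r hnd h
    simp only [List.foldl_cons]
    rw [pvInsertSame r y (f y) hnd (h y (by simp))]
    exact ih r hnd (fun k hk => h k (by simp [hk]))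

-- invariant of A's outer loop: every stored row is the full bit row of its key
lemma pvOuterA (xs : List String) : ∀ (ms : List String) (d : PySem.Dict String (PySem.Dict String Int)),
    (∀ l1 v, d.get? l1 = some v →
      v.keys = PySem.List.dedup xs ∧ v.keys.Nodup ∧ ∀ l2 ∈ PySem.List.dedup xs, v.getD l2 0 = pvBit l1 l2) →
    ∀ l1 v, (ms.foldl (fun d m => d.insert m (xs.foldl (fun r k' => r.insert k' (pvBit m k')) (d.getD m PySem.Dict.empty))) d).get? l1 = some v →
      v.keys = PySem.List.dedup xs ∧ v.keys.Nodup ∧ ∀ l2 ∈ PySem.List.dedup xs, v.getD l2 0 = pvBit l1 l2 := by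
  intro ms
  induction ms with
  | nil => intro d h; exact h
  | cons m t ih =>
    intro d h
    simp only [List.foldl_cons]
    refine ih _ ?_
    intro l1 v hv
    by_cases hlm : l1 = m
    · subst hlm
      rw [PySem.Dict.get?_insert_self] at hv
      have hv' := (Option.some.inj hv).symm
      cases hdm : d.get? l1 with
      | none =>
        rw [PySem.Dict.getD_of_get?_eq_none _ _ hdm] at hv'
        subst hv'
        have hkeys : (xs.foldl (fun r k' => r.insert k' (pvBit l1 k')) PySem.Dict.empty).keys = PySem.List.dedup xs := by
          rw [PySem.Dict.keys_foldl_insert xs (fun _ k' => pvBit l1 k'),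
            PySem.Dict.keys_empty, PySem.Set.update_nil_left, PySem.List.dedup_eq_ofList]
        refine ⟨hkeys, ?_, ?_⟩
        · rw [hkeys, PySem.List.dedup_eq_ofList]; exact PySem.Set.nodup_ofList xs
        · intro l2 hl2
          exact pvRowProp (pvBit l1) 0 xs PySem.Dict.empty (by simp [PySem.Dict.keys_empty]) l2
            (by rw [hkeys]; exact hl2)
      | some w =>
        have hw := h l1 w hdm
        rw [PySem.Dict.getD_of_get?_eq_some _ _ hdm] at hv'
        have hfix : xs.foldl (fun r k' => r.insert k' (pvBit l1 k')) w = w := by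
          refine pvFoldlInsertFixed (pvBit l1) xs w hw.2.1 ?_
          intro k hk
          have hkd : k ∈ PySem.List.dedup xs := by
            rw [PySem.List.dedup_eq_ofList]; exact (PySem.Set.mem_ofList _ _).mpr hk
          have hkmem : k ∈ w.keys := by rw [hw.1]; exact hkd
          cases hgk : w.get? k with
          | none => exact absurd ((PySem.Dict.get?_eq_none_iff_not_mem_keys w k).mp hgk) (by simp [hkmem])
          | some u =>
            have hval := hw.2.2 k hkd
            rw [PySem.Dict.getD_of_get?_eq_some _ _ hgk] at hval
            exact congrArg some hval
        rw [hfix] at hv'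
        subst hv'
        exact hw
    · rw [PySem.Dict.get?_insert_of_ne _ _ hlm] at hv
      exact h l1 v hv

theorem pvA_eq_pvF (xs : List String) : get_lang2lang_script_dict xs = pvF xs := by
  cases xs with
  | nil => rfl
  | cons x xs' =>
    show (List.foldl (fun d lang1 =>
        List.foldl (fun d lang2 =>
          let lang1_script := pvScript lang1
          let lang2_script := pvScript lang2
          if lang1_script == lang2_script then
            let d := if d.contains lang1 then d else d.insert lang1 PySem.Dict.empty
            d.insert lang1 ((d.getD lang1 PySem.Dict.empty).insert lang2 (1 : Int))
          else
            let d := if d.contains lang1 then d else d.insert lang1 PySem.Dict.empty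
            d.insert lang1 ((d.getD lang1 PySem.Dict.empty).insert lang2 (0 : Int))) d (x :: xs'))
        PySem.Dict.empty (x :: xs')).items.map (fun p => (p.1, p.2.items)) = pvF (x :: xs')
    have hbody : (fun (d : PySem.Dict String (PySem.Dict String Int)) (lang1 : String) =>
        List.foldl (fun d lang2 =>
          let lang1_script := pvScript lang1
          let lang2_script := pvScript lang2
          if lang1_script == lang2_script then
            let d := if d.contains lang1 then d else d.insert lang1 PySem.Dict.empty
            d.insert lang1 ((d.getD lang1 PySem.Dict.empty).insert lang2 (1 : Int))
          else
            let d := if d.contains lang1 then d else d.insert lang1 PySem.Dict.empty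
            d.insert lang1 ((d.getD lang1 PySem.Dict.empty).insert lang2 (0 : Int))) d (x :: xs'))
      = (fun d m => d.insert m (List.foldl (fun r k' => r.insert k' (pvBit m k')) (d.getD m PySem.Dict.empty) (x :: xs'))) := by
      funext d m
      have h1 : (fun (d : PySem.Dict String (PySem.Dict String Int)) (lang2 : String) =>
          let lang1_script := pvScript m
          let lang2_script := pvScript lang2
          if lang1_script == lang2_script then
            let d := if d.contains m then d else d.insert m PySem.Dict.empty
            d.insert m ((d.getD m PySem.Dict.empty).insert lang2 (1 : Int))
          else
            let d := if d.contains m then d else d.insert m PySem.Dict.empty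
            d.insert m ((d.getD m PySem.Dict.empty).insert lang2 (0 : Int))) = pvStep m :=
        funext fun d => funext fun l2 => pvStepA_norm d m l2
      rw [h1]
      exact pvInnerA m xs' x d
    rw [hbody]
    have hN : (List.foldl (fun d m => d.insert m (List.foldl (fun r k' => r.insert k' (pvBit m k')) (d.getD m PySem.Dict.empty) (x :: xs')))
        PySem.Dict.empty (x :: xs')).keys.Nodup :=
      PySem.Dict.nodup_keys_foldl_insert _ _ _ PySem.Dict.nodup_keys_empty
    have hK : (List.foldl (fun d m => d.insert m (List.foldl (fun r k' => r.insert k' (pvBit m k')) (d.getD m PySem.Dict.empty) (x :: xs')))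
        PySem.Dict.empty (x :: xs')).keys = PySem.List.dedup (x :: xs') := by
      rw [PySem.Dict.keys_foldl_insert (x :: xs')
          (fun d m => List.foldl (fun r k' => r.insert k' (pvBit m k')) (d.getD m PySem.Dict.empty) (x :: xs')),
        PySem.Dict.keys_empty, PySem.Set.update_nil_left, PySem.List.dedup_eq_ofList]
    have hP := pvOuterA (x :: xs') (x :: xs') PySem.Dict.empty
      (fun l1 v h => by simp [PySem.Dict.get?_empty] at h)
    rw [PySem.Dict.items_eq_map_keys _ hN PySem.Dict.empty, hK, List.map_map]
    unfold pvF
    refine List.map_congr_left (fun l1 hl1 => ?_)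
    obtain ⟨v, hv⟩ : ∃ v, (List.foldl (fun d m => d.insert m (List.foldl (fun r k' => r.insert k' (pvBit m k')) (d.getD m PySem.Dict.empty) (x :: xs')))
        PySem.Dict.empty (x :: xs')).get? l1 = some v := by
      cases hg : (List.foldl (fun d m => d.insert m (List.foldl (fun r k' => r.insert k' (pvBit m k')) (d.getD m PySem.Dict.empty) (x :: xs')))
          PySem.Dict.empty (x :: xs')).get? l1 with
      | none =>
        have hmem : l1 ∈ (List.foldl (fun d m => d.insert m (List.foldl (fun r k' => r.insert k' (pvBit m k')) (d.getD m PySem.Dict.empty) (x :: xs')))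
            PySem.Dict.empty (x :: xs')).keys := by rw [hK]; exact hl1
        exact absurd hmem ((PySem.Dict.get?_eq_none_iff_not_mem_keys _ _).mp hg)
      | some w => exact ⟨w, rfl⟩
    have hprops := hP l1 v hv
    simp only [Function.comp]
    rw [PySem.Dict.getD_of_get?_eq_some _ _ hv,
      PySem.Dict.items_eq_map_keys v hprops.2.1 0, hprops.1]
    refine congrArg (fun z => (l1, z)) (List.map_congr_left (fun l2 hl2 => ?_))
    rw [hprops.2.2 l2 hl2]

-- B proof side: the script grouping dict, its pair list, and their characterizations
def pvGroups (xs : List String) : PySem.Dict String (List String) :=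
  xs.foldl (fun g lang => g.modify (pvScript lang) [] (fun ls => ls ++ [lang])) PySem.Dict.empty

def pvPairs (xs : List String) : List (String × String) :=
  (pvGroups xs).values.flatMap (fun langs => langs.flatMap (fun a => langs.map (fun b => (a, b))))

lemma pvGroups_getD (xs : List String) (s : String) :
    (pvGroups xs).getD s [] = xs.filter (fun l => pvScript l == s) := by
  unfold pvGroups
  have hmap : (xs.map (fun l => (pvScript l, l))).foldl
        (fun (d : PySem.Dict String (List String)) (p : String × String) =>
          d.modify p.1 [] (fun x => x ++ [p.2])) PySem.Dict.empty
      = xs.foldl (fun g lang => g.modify (pvScript lang) [] (fun ls => ls ++ [lang]))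
          PySem.Dict.empty := List.foldl_map
  rw [← hmap, PySem.Dict.getD_foldl_modify_append, PySem.Dict.getD_empty,
    List.filter_map, List.map_map]
  simp [Function.comp_def]

lemma pvGroups_keys (xs : List String) :
    (pvGroups xs).keys = PySem.Set.ofList (xs.map pvScript) := by
  unfold pvGroups
  rw [PySem.Dict.keys_foldl_modify_key xs pvScript [] (fun _ lang => fun ls => ls ++ [lang]),
    PySem.Dict.keys_empty, PySem.Set.update_nil_left]

lemma pvMemPairs (xs : List String) (l1 l2 : String) :
    (l1, l2) ∈ pvPairs xs ↔ (l1 ∈ xs ∧ l2 ∈ xs ∧ pvScript l1 = pvScript l2) := by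
  have hnd : (pvGroups xs).keys.Nodup := by
    rw [pvGroups_keys]; exact PySem.Set.nodup_ofList _
  have hvals : (pvGroups xs).values
      = (pvGroups xs).keys.map (fun s => xs.filter (fun l => pvScript l == s)) := by
    rw [PySem.Dict.values_eq_map_keys _ hnd []]
    exact List.map_congr_left (fun s _ => pvGroups_getD xs s)
  constructor
  · intro h
    rw [pvPairs, hvals] at h
    simp only [List.mem_flatMap, List.mem_map] at h
    obtain ⟨langs, ⟨s, hs, hlangs⟩, a, ha, b, hb, heq⟩ := h
    cases heq
    subst hlangs
    have ha' := List.mem_filter.mp ha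
    have hb' := List.mem_filter.mp hb
    exact ⟨ha'.1, hb'.1, by rw [beq_iff_eq.mp ha'.2, beq_iff_eq.mp hb'.2]⟩
  · rintro ⟨h1, h2, h3⟩
    rw [pvPairs, hvals]
    simp only [List.mem_flatMap, List.mem_map]
    refine ⟨xs.filter (fun l => pvScript l == pvScript l1),
      ⟨pvScript l1, ?_, rfl⟩, l1, ?_, l2, ?_, rfl⟩
    · rw [pvGroups_keys]
      exact (PySem.Set.mem_ofList _ _).mpr (List.mem_map.mpr ⟨l1, h1, rfl⟩)
    · exact List.mem_filter.mpr ⟨h1, beq_iff_eq.mpr rfl⟩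
    · exact List.mem_filter.mpr ⟨h2, beq_iff_eq.mpr h3.symm⟩

-- flatten B's nested fill loops into one fold over a pair list
lemma pvFoldlFlatMap {σ α β : Type} (f : α → List β) (g : σ → β → σ) :
    ∀ (l : List α) (i : σ), (l.flatMap f).foldl g i = l.foldl (fun a x => (f x).foldl g a) i := by
  intro l
  induction l with
  | nil => intro i; rfl
  | cons x t ih => intro i; rw [List.flatMap_cons, List.foldl_append, List.foldl_cons, ih]

lemma pvNestedToPairs {σ : Type} (F : σ → String → String → σ) (vals : List (List String)) (d : σ) :
    vals.foldl (fun d langs => langs.foldl (fun d a => langs.foldl (fun d b => F d a b) d) d) d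
      = (vals.flatMap (fun langs => langs.flatMap (fun a => langs.map (fun b => (a, b))))).foldl
          (fun d p => F d p.1 p.2) d := by
  rw [pvFoldlFlatMap]
  refine (PySem.List.foldl_congr_mem _ _ _ _ (fun acc langs _ => ?_)).symm
  rw [pvFoldlFlatMap]
  refine (PySem.List.foldl_congr_mem _ _ _ _ (fun acc2 a _ => ?_)).symm
  exact (List.foldl_map (f := fun b => (a, b)) (g := fun d p => F d p.1 p.2)
    (l := langs) (init := acc2)).symm

-- values stored by a constant-value insert loop
lemma pvConstVal {ν : Type} (c : ν) : ∀ (ms : List String) (d : PySem.Dict String ν),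
    (∀ k v, d.get? k = some v → v = c) →
    ∀ k v, (ms.foldl (fun d m => d.insert m c) d).get? k = some v → v = c := by
  intro ms
  induction ms with
  | nil => intro d h; exact h
  | cons m t ih =>
    intro d h
    simp only [List.foldl_cons]
    refine ih _ ?_
    intro k v hv
    by_cases hkm : k = m
    · subst hkm; rw [PySem.Dict.get?_insert_self] at hv; exact (Option.some.inj hv).symm
    · rw [PySem.Dict.get?_insert_of_ne _ _ hkm] at hv; exact h k v hv

-- the fill phase: starting from a full matrix for g, setting every pair of ps to 1
lemma pvFill (xs : List String) : ∀ (ps : List (String × String)) (g : String → String → Int)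
    (d : PySem.Dict String (PySem.Dict String Int)),
    d.keys = PySem.List.dedup xs → d.keys.Nodup →
    (∀ l1 v, d.get? l1 = some v →
      v.keys = PySem.List.dedup xs ∧ v.keys.Nodup ∧ ∀ l2 ∈ PySem.List.dedup xs, v.getD l2 0 = g l1 l2) →
    (∀ p ∈ ps, p.1 ∈ xs ∧ p.2 ∈ xs) →
    (ps.foldl (fun d p => d.insert p.1 ((d.getD p.1 PySem.Dict.empty).insert p.2 (1 : Int))) d).keys = PySem.List.dedup xs ∧
    (ps.foldl (fun d p => d.insert p.1 ((d.getD p.1 PySem.Dict.empty).insert p.2 (1 : Int))) d).keys.Nodup ∧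
    ∀ l1 v, (ps.foldl (fun d p => d.insert p.1 ((d.getD p.1 PySem.Dict.empty).insert p.2 (1 : Int))) d).get? l1 = some v →
      v.keys = PySem.List.dedup xs ∧ v.keys.Nodup ∧
        ∀ l2 ∈ PySem.List.dedup xs, v.getD l2 0 = (if (l1, l2) ∈ ps then 1 else g l1 l2) := by
  intro ps
  induction ps with
  | nil =>
    intro g d hK hN h _
    refine ⟨hK, hN, ?_⟩
    intro l1 v hv
    obtain ⟨k1, k2, k3⟩ := h l1 v hv
    exact ⟨k1, k2, fun l2 hl2 => by simpa using k3 l2 hl2⟩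
  | cons p t ih =>
    obtain ⟨a, b⟩ := p
    intro g d hK hN h hps
    have ha : a ∈ xs := (hps (a, b) (by simp)).1
    have hb : b ∈ xs := (hps (a, b) (by simp)).2
    have haK : a ∈ d.keys := by rw [hK]; exact (PySem.List.mem_dedup _ _).mpr ha
    have hac : d.contains a = true := (PySem.Dict.contains_iff_mem_keys _ _).mpr haK
    obtain ⟨w, hw⟩ : ∃ w, d.get? a = some w := by
      cases hg : d.get? a with
      | none => exact absurd haK ((PySem.Dict.get?_eq_none_iff_not_mem_keys _ _).mp hg)
      | some w => exact ⟨w, rfl⟩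
    have hrow := h a w hw
    have hbw : b ∈ w.keys := by rw [hrow.1]; exact (PySem.List.mem_dedup _ _).mpr hb
    have hbc : w.contains b = true := (PySem.Dict.contains_iff_mem_keys _ _).mpr hbw
    simp only [List.foldl_cons]
    have hstep : d.insert a ((d.getD a PySem.Dict.empty).insert b (1 : Int))
        = d.insert a (w.insert b 1) := by rw [PySem.Dict.getD_of_get?_eq_some _ _ hw]
    rw [hstep]
    have hK1 : (d.insert a (w.insert b 1)).keys = PySem.List.dedup xs := by
      rw [PySem.Dict.keys_insert_of_contains _ _ hac]; exact hK
    have hN1 : (d.insert a (w.insert b 1)).keys.Nodup := PySem.Dict.nodup_keys_insert _ _ _ hN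
    have h1 : ∀ l1 v, (d.insert a (w.insert b 1)).get? l1 = some v →
        v.keys = PySem.List.dedup xs ∧ v.keys.Nodup ∧
          ∀ l2 ∈ PySem.List.dedup xs, v.getD l2 0 =
            (if l1 = a ∧ l2 = b then 1 else g l1 l2) := by
      intro l1 v hv
      by_cases hla : l1 = a
      · subst hla
        rw [PySem.Dict.get?_insert_self] at hv
        cases Option.some.inj hv
        refine ⟨by rw [PySem.Dict.keys_insert_of_contains _ _ hbc]; exact hrow.1,
          PySem.Dict.nodup_keys_insert _ _ _ hrow.2.1, ?_⟩
        intro l2 hl2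
        rw [PySem.Dict.getD_insert]
        rcases eq_or_ne l2 b with hlb | hlb
        · simp [hlb]
        · rw [if_neg hlb, hrow.2.2 l2 hl2, if_neg (by simp [hlb])]
      · rw [PySem.Dict.get?_insert_of_ne _ _ hla] at hv
        obtain ⟨k1, k2, k3⟩ := h l1 v hv
        exact ⟨k1, k2, fun l2 hl2 => by rw [k3 l2 hl2]; simp [hla]⟩
    obtain ⟨r1, r2, r3⟩ := ih (fun l1 l2 => if l1 = a ∧ l2 = b then 1 else g l1 l2)
      (d.insert a (w.insert b 1)) hK1 hN1 h1 (fun q hq => hps q (by simp [hq]))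
    refine ⟨r1, r2, ?_⟩
    intro l1 v hv
    obtain ⟨k1, k2, k3⟩ := r3 l1 v hv
    refine ⟨k1, k2, fun l2 hl2 => ?_⟩
    rw [k3 l2 hl2]
    simp only [List.mem_cons, Prod.mk.injEq]
    split_ifs <;> tauto

-- the all-zero matrix built by B's dict comprehension
lemma pvRes0 (xs : List String) :
    (xs.foldl (fun d l1 => d.insert l1 (xs.foldl (fun m l2 => m.insert l2 (0 : Int)) PySem.Dict.empty)) PySem.Dict.empty).keys = PySem.List.dedup xs ∧
    (xs.foldl (fun d l1 => d.insert l1 (xs.foldl (fun m l2 => m.insert l2 (0 : Int)) PySem.Dict.empty)) PySem.Dict.empty).keys.Nodup ∧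
    ∀ l1 v, (xs.foldl (fun d l1 => d.insert l1 (xs.foldl (fun m l2 => m.insert l2 (0 : Int)) PySem.Dict.empty)) PySem.Dict.empty).get? l1 = some v →
      v.keys = PySem.List.dedup xs ∧ v.keys.Nodup ∧ ∀ l2 ∈ PySem.List.dedup xs, v.getD l2 0 = (0 : Int) := by
  have hZkeys : (xs.foldl (fun m l2 => m.insert l2 (0 : Int)) PySem.Dict.empty).keys = PySem.List.dedup xs := by
    rw [PySem.Dict.keys_foldl_insert xs (fun _ _ => (0 : Int)), PySem.Dict.keys_empty,
      PySem.Set.update_nil_left, PySem.List.dedup_eq_ofList]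
  refine ⟨?_, ?_, ?_⟩
  · rw [PySem.Dict.keys_foldl_insert xs
      (fun _ _ => xs.foldl (fun m l2 => m.insert l2 (0 : Int)) PySem.Dict.empty),
      PySem.Dict.keys_empty, PySem.Set.update_nil_left, PySem.List.dedup_eq_ofList]
  · exact PySem.Dict.nodup_keys_foldl_insert _ _ _ PySem.Dict.nodup_keys_empty
  · intro l1 v hv
    have hvZ : v = xs.foldl (fun m l2 => m.insert l2 (0 : Int)) PySem.Dict.empty :=
      pvConstVal _ xs PySem.Dict.empty (fun k v h => by simp [PySem.Dict.get?_empty] at h) l1 v hv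
    subst hvZ
    refine ⟨hZkeys, by rw [hZkeys, PySem.List.dedup_eq_ofList]; exact PySem.Set.nodup_ofList xs, ?_⟩
    intro l2 hl2
    exact pvRowProp (fun _ => (0 : Int)) 0 xs PySem.Dict.empty (by simp [PySem.Dict.keys_empty]) l2
      (by rw [hZkeys]; exact hl2)

theorem pvB_eq_pvF (xs : List String) : get_lang2lang_script_dict_alt xs = pvF xs := by
  show ((pvGroups xs).values.foldl
      (fun d langs => langs.foldl (fun d a =>
        langs.foldl (fun d b => d.insert a ((d.getD a PySem.Dict.empty).insert b (1 : Int))) d) d)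
      (xs.foldl (fun d l1 => d.insert l1 (xs.foldl (fun m l2 => m.insert l2 (0 : Int)) PySem.Dict.empty)) PySem.Dict.empty)).items.map
      (fun p => (p.1, p.2.items)) = pvF xs
  have hnest : ((pvGroups xs).values.foldl
      (fun d langs => langs.foldl (fun d a =>
        langs.foldl (fun d b => d.insert a ((d.getD a PySem.Dict.empty).insert b (1 : Int))) d) d)
      (xs.foldl (fun d l1 => d.insert l1 (xs.foldl (fun m l2 => m.insert l2 (0 : Int)) PySem.Dict.empty)) PySem.Dict.empty))
      = ((pvPairs xs).foldl (fun d p => d.insert p.1 ((d.getD p.1 PySem.Dict.empty).insert p.2 (1 : Int)))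
      (xs.foldl (fun d l1 => d.insert l1 (xs.foldl (fun m l2 => m.insert l2 (0 : Int)) PySem.Dict.empty)) PySem.Dict.empty)) :=
    pvNestedToPairs (fun (d : PySem.Dict String (PySem.Dict String Int)) (a b : String) =>
      d.insert a ((d.getD a PySem.Dict.empty).insert b (1 : Int))) _ _
  rw [hnest]
  obtain ⟨z1, z2, z3⟩ := pvRes0 xs
  obtain ⟨r1, r2, r3⟩ := pvFill xs (pvPairs xs) (fun _ _ => (0 : Int)) _ z1 z2 z3
    (fun p hp => by
      obtain ⟨a, b⟩ := p
      have := (pvMemPairs xs a b).mp hp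
      exact ⟨this.1, this.2.1⟩)
  rw [PySem.Dict.items_eq_map_keys _ r2 PySem.Dict.empty, r1, List.map_map]
  unfold pvF
  refine List.map_congr_left (fun l1 hl1 => ?_)
  obtain ⟨v, hv⟩ : ∃ v, ((pvPairs xs).foldl (fun d p => d.insert p.1 ((d.getD p.1 PySem.Dict.empty).insert p.2 (1 : Int)))
      (xs.foldl (fun d l1 => d.insert l1 (xs.foldl (fun m l2 => m.insert l2 (0 : Int)) PySem.Dict.empty)) PySem.Dict.empty)).get? l1 = some v := by
    cases hg : ((pvPairs xs).foldl (fun d p => d.insert p.1 ((d.getD p.1 PySem.Dict.empty).insert p.2 (1 : Int)))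
        (xs.foldl (fun d l1 => d.insert l1 (xs.foldl (fun m l2 => m.insert l2 (0 : Int)) PySem.Dict.empty)) PySem.Dict.empty)).get? l1 with
    | none =>
      have hmem : l1 ∈ ((pvPairs xs).foldl (fun d p => d.insert p.1 ((d.getD p.1 PySem.Dict.empty).insert p.2 (1 : Int)))
          (xs.foldl (fun d l1 => d.insert l1 (xs.foldl (fun m l2 => m.insert l2 (0 : Int)) PySem.Dict.empty)) PySem.Dict.empty)).keys := by
        rw [r1]; exact hl1
      exact absurd hmem ((PySem.Dict.get?_eq_none_iff_not_mem_keys _ _).mp hg)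
    | some w => exact ⟨w, rfl⟩
  have hprops := r3 l1 v hv
  simp only [Function.comp]
  rw [PySem.Dict.getD_of_get?_eq_some _ _ hv,
    PySem.Dict.items_eq_map_keys v hprops.2.1 0, hprops.1]
  refine congrArg (fun z => (l1, z)) (List.map_congr_left (fun l2 hl2 => ?_))
  rw [hprops.2.2 l2 hl2]
  unfold pvBit
  have h1 : l1 ∈ xs := (PySem.List.mem_dedup _ _).mp hl1
  have h2 : l2 ∈ xs := (PySem.List.mem_dedup _ _).mp hl2
  by_cases hs : pvScript l1 = pvScript l2
  · rw [if_pos ((pvMemPairs xs l1 l2).mpr ⟨h1, h2, hs⟩), if_pos (beq_iff_eq.mpr hs)]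
  · rw [if_neg (fun hmem => hs ((pvMemPairs xs l1 l2).mp hmem).2.2),
      if_neg (by simp [hs])]

-- ===== VERDICT (by name: the statement is the Claim_ definition above) =====
theorem get_lang2lang_script_dict_spec : Claim_equal_get_lang2lang_script_dict := by
  intro xs _ _
  unfold Spec_get_lang2lang_script_dict
  rw [pvA_eq_pvF, pvB_eq_pvF]
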